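-- pv_equiv track=rewrite | github.com/minsing-jin/Minsingsik_algorithm_study_contents | programmers/실패 문제들/Get_report_result.py | solution
-- ===== SOURCE A (Python) =====
-- def solution(id_list, report, k):
--
--     report = set(report)  # 중복조건 빼주기!!!
--
--     report_list = []
--
--     answer = {id : 0 for id in id_list}
--     id_dic_report_cnt = {id : 0 for id in id_list}
--
--     for i in report:
--         id_dic_report_cnt[i.split()[1]] += 1 # id당 리폿당한 횟수 카운팅
--
--     for n in report:
--         if id_dic_report_cnt[n.split()[1]] >= k:
--             answer[n.split()[0]] += 1
--
--
--
--     return list(answer.values())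
-- ===== SOURCE B (Python) =====
-- def solution(id_list, report, k):
--     reps = set(report)
--
--     def confirmed(r):
--         target = r.split()[1]
--         return sum(1 for x in reps if x.split()[1] == target) >= k
--
--     out = []
--     seen = []
--     for i in id_list:
--         if i in seen:
--             continue
--         seen.append(i)
--         out.append(sum(1 for r in reps if r.split()[0] == i and confirmed(r)))
--     return out
-- ===== Notes on version B (the rewrite author's own statement) =====
-- stated objective: alternative
-- what changed: Drops A's mutable count dicts and two incremental passes entirely: B computes each output entry directly, counting for each distinct id (in id_list order) the deduped reports filed by that id whose reported user appears in at least k deduped reports, via nested scans with no dict.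
import Mathlib
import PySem

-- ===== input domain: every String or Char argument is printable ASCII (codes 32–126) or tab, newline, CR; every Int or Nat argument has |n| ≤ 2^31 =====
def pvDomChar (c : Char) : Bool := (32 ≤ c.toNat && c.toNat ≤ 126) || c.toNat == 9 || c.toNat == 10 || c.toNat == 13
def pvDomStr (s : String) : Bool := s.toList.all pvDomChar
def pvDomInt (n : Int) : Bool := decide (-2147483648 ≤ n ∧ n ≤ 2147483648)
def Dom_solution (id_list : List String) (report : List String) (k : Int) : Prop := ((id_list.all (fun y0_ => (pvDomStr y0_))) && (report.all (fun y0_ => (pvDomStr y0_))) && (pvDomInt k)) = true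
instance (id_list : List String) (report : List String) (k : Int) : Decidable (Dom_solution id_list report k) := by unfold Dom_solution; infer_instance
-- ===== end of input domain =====

-- B drops A's mutable count dicts and two incremental passes: it computes each output entry
-- directly, counting for each distinct id (in id_list order) the deduped reports filed by that id
-- whose reported user appears in ≥ k deduped reports; objective: alternative (dict-free nested scans).

-- shared transliteration helpers: r.split()[0] and r.split()[1] (IndexError → outside Pre_)
def pvTok0 (r : String) : String := (PySem.Str.split₀ r).getD 0 ""
def pvTok1 (r : String) : String := (PySem.Str.split₀ r).getD 1 ""

-- ===== PORT A =====
def solution (id_list : List String) (report : List String) (k : Int) : List Int :=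
  let rep := PySem.Set.ofList report          -- report = set(report)
  let answer : PySem.Dict String Int :=
    id_list.foldl (fun d i => d.insert i 0) PySem.Dict.empty
  let cntd : PySem.Dict String Int :=
    id_list.foldl (fun d i => d.insert i 0) PySem.Dict.empty
  -- for i in report: id_dic_report_cnt[i.split()[1]] += 1   (KeyError on id outside id_list → outside Pre_)
  let cntd := rep.foldl (fun d i => d.modify (pvTok1 i) 0 (· + 1)) cntd
  -- for n in report: if id_dic_report_cnt[n.split()[1]] >= k: answer[n.split()[0]] += 1
  let answer := rep.foldl (fun d n =>
    if k ≤ cntd.getD (pvTok1 n) 0 then d.modify (pvTok0 n) 0 (· + 1) else d) answer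
  answer.values

-- ===== PORT B =====
-- confirmed(r): sum(1 for x in reps if x.split()[1] == r.split()[1]) >= k
def pvConfirmedB (reps : List String) (k : Int) (r : String) : Bool :=
  decide (k ≤ ((reps.filter (fun x => pvTok1 x == pvTok1 r)).length : Int))

def solution_alt (id_list : List String) (report : List String) (k : Int) : List Int :=
  let reps := PySem.Set.ofList report         -- reps = set(report)
  -- for i in id_list: if i in seen: continue; seen.append(i);
  --   out.append(sum(1 for r in reps if r.split()[0] == i and confirmed(r)))
  (id_list.foldl
    (fun (st : List String × List Int) i =>
      if i ∈ st.1 then st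
      else (st.1 ++ [i],
            st.2 ++ [((reps.filter (fun r => pvTok0 r == i && pvConfirmedB reps k r)).length : Int)]))
    ([], [])).2

-- ===== PRECONDITION & SPEC =====
-- pvCnt report t = how many DISTINCT report lines name t as the reported user
def pvCnt (report : List String) (t : String) : Nat :=
  ((PySem.Set.ofList report).map pvTok1).count t

-- Pre_ holds exactly when A returns normally: every report line has ≥ 2 tokens (else IndexError),
-- its reported user is in id_list (else KeyError in the counting pass), and whenever that user's
-- distinct-report count reaches k the reporter is in id_list too (else KeyError in the second pass).
def Pre_solution (id_list : List String) (report : List String) (k : Int) : Prop :=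
  ∀ r ∈ report,
    2 ≤ (PySem.Str.split₀ r).length ∧
    pvTok1 r ∈ id_list ∧
    (k ≤ (pvCnt report (pvTok1 r) : Int) → pvTok0 r ∈ id_list)
instance (id_list : List String) (report : List String) (k : Int) : Decidable (Pre_solution id_list report k) := by unfold Pre_solution; infer_instance

def pvWitness_solution : List String × List String × Int := (["muzi", "frodo"], ["muzi frodo", "frodo muzi"], 1)

def Spec_solution (id_list : List String) (report : List String) (k : Int) (out : List Int) : Prop := out = solution_alt id_list report k
instance (id_list : List String) (report : List String) (k : Int) (out : List Int) : Decidable (Spec_solution id_list report k out) := by unfold Spec_solution; infer_instance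

-- ===== CLAIM (what is proved, stated in full; the proofs are below) =====
def Claim_equal_solution : Prop := ∀ (id_list : List String) (report : List String) (k : Int), Dom_solution id_list report k → Pre_solution id_list report k → Spec_solution id_list report k (solution id_list report k)

-- ===== LEMMAS AND PROOFS =====

-- the common normal form of both outputs: for every id in id_list order (deduped), the number of
-- distinct report lines whose reported user was reported ≥ k times and whose reporter is that id
def pvOut (id_list : List String) (report : List String) (k : Int) : List Int :=
  (PySem.Set.ofList id_list).map (fun t =>
    ((((PySem.Set.ofList report).filter
          (fun x => decide (k ≤ (pvCnt report (pvTok1 x) : Int)))).map pvTok0).count t : Int))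

-- a fold of inserts of 0 keeps every getD-at-0 equal to 0
lemma pv_getD_zero (l : List String) (d : PySem.Dict String Int) (t : String)
    (h : d.getD t 0 = 0) : (l.foldl (fun d i => d.insert i 0) d).getD t 0 = 0 := by
  induction l generalizing d with
  | nil => exact h
  | cons x l ih =>
    apply ih
    rw [PySem.Dict.getD_insert]
    split_ifs <;> simp [h]

lemma pv_keys_zero (l : List String) :
    (l.foldl (fun d i => d.insert i (0 : Int)) PySem.Dict.empty).keys = PySem.Set.ofList l := by
  have h := PySem.Dict.keys_foldl_insert l (fun _ _ => (0 : Int)) PySem.Dict.empty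
  rw [h, PySem.Set.ofList_eq_foldl]
  rfl

lemma pv_nodup_zero (l : List String) :
    (l.foldl (fun d i => d.insert i (0 : Int)) PySem.Dict.empty).keys.Nodup := by
  exact PySem.Dict.nodup_keys_foldl_insert l (fun _ _ => (0 : Int)) PySem.Dict.empty
    PySem.Dict.nodup_keys_empty

-- Set.update by elements already present changes nothing
lemma pv_update_absorb (s : PySem.Set String) (l : List String)
    (h : ∀ x ∈ l, x ∈ s) : PySem.Set.update s l = s := by
  induction l generalizing s with
  | nil => rfl
  | cons x l ih =>
    have hx : x ∈ s := h x (by simp)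
    have hadd : PySem.Set.add s x = s := by simp [PySem.Set.add, PySem.Set.contains, hx]
    have h1 : PySem.Set.update s (x :: l) = PySem.Set.update (PySem.Set.add s x) l := rfl
    rw [h1, hadd]
    exact ih s (fun y hy => h y (by simp [hy]))

lemma pv_count_map (l : List String) (f : String → String) (s : String) :
    (l.map f).count s = (l.filter (fun x => f x == s)).length := by
  induction l with
  | nil => rfl
  | cons x l ih => by_cases h : f x = s <;> simp [h, ih]

-- the counting dict of A, characterised pointwise
lemma pv_cntd_getD (id_list report : List String) (s : String) :
    ((PySem.Set.ofList report).foldl (fun d i => d.modify (pvTok1 i) 0 (· + 1))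
        (id_list.foldl (fun d i => d.insert i 0) PySem.Dict.empty)).getD s 0
      = (pvCnt report s : Int) := by
  have e := List.foldl_map (f := pvTok1)
    (g := fun (d : PySem.Dict String Int) x => d.modify x 0 (· + 1))
    (l := PySem.Set.ofList report)
    (init := id_list.foldl (fun d i => d.insert i 0) PySem.Dict.empty)
  rw [← e, PySem.Dict.getD_foldl_modify_add_one,
    pv_getD_zero id_list PySem.Dict.empty s (by simp [PySem.Dict.getD_empty])]
  simp [pvCnt]

-- ===== A-side characterisation =====
lemma pv_A_values (id_list report : List String) (k : Int)
    (hpre : Pre_solution id_list report k) :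
    solution id_list report k = pvOut id_list report k := by
  simp only [solution, pvOut]
  simp only [pv_cntd_getD]
  rw [PySem.List.foldl_ite_eq_foldl_filter]
  have e2 := List.foldl_map (f := pvTok0)
    (g := fun (d : PySem.Dict String Int) x => d.modify x 0 (· + 1))
    (l := (PySem.Set.ofList report).filter
      (fun x => decide (k ≤ (pvCnt report (pvTok1 x) : Int))))
    (init := id_list.foldl (fun d i => d.insert i 0) PySem.Dict.empty)
  rw [← e2]
  have hMmem : ∀ y ∈ ((PySem.Set.ofList report).filter
      (fun x => decide (k ≤ (pvCnt report (pvTok1 x) : Int)))).map pvTok0,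
      y ∈ PySem.Set.ofList id_list := by
    intro y hy
    obtain ⟨x, hx, rfl⟩ := List.mem_map.mp hy
    have hx' := List.mem_filter.mp hx
    have hxr : x ∈ report := (PySem.Set.mem_ofList report x).mp hx'.1
    exact (PySem.Set.mem_ofList id_list (pvTok0 x)).mpr
      ((hpre x hxr).2.2 (of_decide_eq_true hx'.2))
  have hkeys := PySem.Dict.keys_foldl_modify_key
    (l := ((PySem.Set.ofList report).filter
      (fun x => decide (k ≤ (pvCnt report (pvTok1 x) : Int)))).map pvTok0)
    (key := fun x => x) (d0 := (0 : Int)) (f := fun _ _ => (· + 1))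
    (d := id_list.foldl (fun d i => d.insert i 0) PySem.Dict.empty)
  simp only [List.map_id'] at hkeys
  rw [pv_keys_zero] at hkeys
  have hnd := PySem.Dict.nodup_keys_foldl_modify_key
    (l := ((PySem.Set.ofList report).filter
      (fun x => decide (k ≤ (pvCnt report (pvTok1 x) : Int)))).map pvTok0)
    (key := fun x => x) (d0 := (0 : Int)) (f := fun _ _ => (· + 1))
    (d := id_list.foldl (fun d i => d.insert i 0) PySem.Dict.empty)
    (pv_nodup_zero id_list)
  rw [PySem.Dict.values_eq_map_keys _ hnd 0, hkeys,
    pv_update_absorb _ _ hMmem]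
  apply List.map_congr_left
  intro t _
  rw [PySem.Dict.getD_foldl_modify_add_one,
    pv_getD_zero id_list PySem.Dict.empty t (by simp [PySem.Dict.getD_empty])]
  simp

-- ===== B-side characterisation =====

-- the per-id entry B computes equals pvOut's entry
lemma pv_entry_eq (report : List String) (k : Int) (t : String) :
    (((PySem.Set.ofList report).filter
        (fun r => pvTok0 r == t && pvConfirmedB (PySem.Set.ofList report) k r)).length : Int)
      = ((((PySem.Set.ofList report).filter
            (fun x => decide (k ≤ (pvCnt report (pvTok1 x) : Int)))).map pvTok0).count t : Int) := by
  rw [pv_count_map, List.filter_filter]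
  congr 2
  apply List.filter_congr
  intro r _
  have hc : pvConfirmedB (PySem.Set.ofList report) k r
      = decide (k ≤ (pvCnt report (pvTok1 r) : Int)) := by
    simp [pvConfirmedB, pvCnt, pv_count_map]
  rw [hc, Bool.and_comm]

-- B's seen/out loop, characterised: out stays the f-image of the deduped-prefix set
lemma pv_fold_seen (f : String → Int) (l : List String) :
    ∀ (s : List String),
      (l.foldl
        (fun (st : List String × List Int) i =>
          if i ∈ st.1 then st else (st.1 ++ [i], st.2 ++ [f i]))
        (s, s.map f)).2
      = (PySem.Set.update s l).map f := by
  induction l with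
  | nil => intro s; rfl
  | cons x l ih =>
    intro s
    rw [List.foldl_cons]
    have hupd : PySem.Set.update s (x :: l) = PySem.Set.update (PySem.Set.add s x) l := rfl
    by_cases hx : x ∈ s
    · have hadd : PySem.Set.add s x = s := by simp [PySem.Set.add, PySem.Set.contains, hx]
      rw [if_pos hx, hupd, hadd]
      exact ih s
    · have hadd : PySem.Set.add s x = s ++ [x] := by
        simp [PySem.Set.add, PySem.Set.contains, hx]
      rw [if_neg hx, hupd, hadd]
      have : s.map f ++ [f x] = (s ++ [x]).map f := by simp
      rw [this]
      exact ih (s ++ [x])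

lemma pv_B_values (id_list report : List String) (k : Int) :
    solution_alt id_list report k = pvOut id_list report k := by
  simp only [solution_alt, pvOut]
  have h0 : ([] : List Int) = ([] : List String).map
      (fun i => (((PySem.Set.ofList report).filter
        (fun r => pvTok0 r == i && pvConfirmedB (PySem.Set.ofList report) k r)).length : Int)) := rfl
  rw [show (([], []) : List String × List Int)
      = (([] : List String), ([] : List String).map
          (fun i => (((PySem.Set.ofList report).filter
            (fun r => pvTok0 r == i && pvConfirmedB (PySem.Set.ofList report) k r)).length : Int)))
    from rfl]
  rw [pv_fold_seen]
  have hset : PySem.Set.update ([] : List String) id_list = PySem.Set.ofList id_list := by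
    rw [PySem.Set.ofList_eq_foldl]; rfl
  rw [hset]
  exact List.map_congr_left (fun t _ => pv_entry_eq report k t)

-- ===== VERDICT (by name: the statement is the Claim_ definition above) =====
theorem solution_spec : Claim_equal_solution := by
  intro id_list report k _hdom hpre
  unfold Spec_solution
  rw [pv_A_values id_list report k hpre, pv_B_values id_list report k]
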